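-- pv_equiv track=rewrite | github.com/keithrozario/advent-of-code | 09/solution.py | find_free_space
-- ===== SOURCE A (Python) =====
-- from itertools import groupby
--
-- def find_free_space(physical_map, num_blocks):
--     """Finds the index of the first occurrence of n consecutive dots using groupby.
--
--     Args:
--         data: The list of characters.
--         n: The number of consecutive dots to search for.
--
--     Returns:
--         The index of the first dot in the sequence, or -1 if not found.
--     """
--     index = 0
--     for key, group in groupby(physical_map):
--         length = len(list(group))
--         if key == "." and length >= num_blocks:
--             return index
--         index += length
--     return -1
-- ===== SOURCE B (Python) =====
-- def find_free_space(physical_map, num_blocks):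
--     count = 0
--     for i, block in enumerate(physical_map):
--         if block == ".":
--             count += 1
--             if count >= num_blocks:
--                 return i - count + 1
--         else:
--             count = 0
--     return -1
-- ===== Notes on version B (the rewrite author's own statement) =====
-- stated objective: simpler
-- what changed: Replaced the groupby run-grouping (which materializes each group as a list to measure it) with a single element-wise scan keeping only a consecutive-dot counter, recovering the run start arithmetically as i - count + 1.
import Mathlib
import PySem

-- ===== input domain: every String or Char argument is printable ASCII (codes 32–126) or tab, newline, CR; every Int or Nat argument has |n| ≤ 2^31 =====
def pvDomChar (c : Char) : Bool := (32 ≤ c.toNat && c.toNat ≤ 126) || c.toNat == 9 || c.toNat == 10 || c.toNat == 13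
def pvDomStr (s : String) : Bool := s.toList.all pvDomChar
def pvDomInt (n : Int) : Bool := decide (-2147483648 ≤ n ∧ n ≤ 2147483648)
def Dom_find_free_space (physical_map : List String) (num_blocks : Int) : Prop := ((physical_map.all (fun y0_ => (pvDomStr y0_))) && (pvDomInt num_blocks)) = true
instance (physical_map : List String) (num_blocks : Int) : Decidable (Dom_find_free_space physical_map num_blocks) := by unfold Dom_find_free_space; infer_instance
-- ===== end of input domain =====

-- B replaces A's groupby run-grouping by a plain consecutive-dot counter scan (simpler; same cost).

-- ===== PORT A =====
-- groupby loop: each step consumes one maximal run of equal elements (key = head,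
-- length = 1 + takeWhile; remainder = dropWhile), exactly as itertools.groupby yields it.
def ffsA_loop (num_blocks : Int) (l : List String) (index : Int) : Int :=
  match l with
  | [] => -1
  | x :: xs =>
    let length : Int := 1 + (xs.takeWhile (fun y => y == x)).length
    if x == "." && decide (length ≥ num_blocks) then index
    else ffsA_loop num_blocks (xs.dropWhile (fun y => y == x)) (index + length)
termination_by l.length
decreasing_by
  simp only [List.length_cons]
  exact Nat.lt_succ_of_le (List.length_dropWhile_le _ _)

def find_free_space (physical_map : List String) (num_blocks : Int) : Int :=
  ffsA_loop num_blocks physical_map 0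

-- ===== PORT B =====
-- single scan: count consecutive dots, return i - count + 1 on reaching num_blocks.
def ffsB_loop (num_blocks : Int) (l : List String) (i : Int) (count : Int) : Int :=
  match l with
  | [] => -1
  | block :: rest =>
    if block == "." then
      let count' := count + 1
      if decide (count' ≥ num_blocks) then i - count' + 1
      else ffsB_loop num_blocks rest (i + 1) count'
    else ffsB_loop num_blocks rest (i + 1) 0

def find_free_space_alt (physical_map : List String) (num_blocks : Int) : Int :=
  ffsB_loop num_blocks physical_map 0 0

-- ===== PRECONDITION & SPEC =====
def Spec_find_free_space (physical_map : List String) (num_blocks : Int) (out : Int) : Prop := out = find_free_space_alt physical_map num_blocks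
instance (physical_map : List String) (num_blocks : Int) (out : Int) : Decidable (Spec_find_free_space physical_map num_blocks out) := by unfold Spec_find_free_space; infer_instance

-- ===== CLAIM (what is proved, stated in full; the proofs are below) =====
def Claim_equal_find_free_space : Prop := ∀ (physical_map : List String) (num_blocks : Int), Dom_find_free_space physical_map num_blocks → Spec_find_free_space physical_map num_blocks (find_free_space physical_map num_blocks)

-- ===== LEMMAS AND PROOFS =====

-- takeWhile (· == x) is a replicate of x's
theorem takeWhile_beq_eq_replicate (x : String) (l : List String) :
    l.takeWhile (fun y => y == x) = List.replicate (l.takeWhile (fun y => y == x)).length x := by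
  induction l with
  | nil => simp
  | cons a as ih =>
    by_cases h : a = x
    · subst h
      simp only [List.takeWhile_cons, beq_self_eq_true, if_pos]
      simp [List.replicate_succ]
      exact ih
    · simp [h]

-- B scanning a block of j dots: triggers (returning i - c) iff c + j reaches num_blocks
theorem ffsB_dots (n : Int) (j : Nat) (d : List String) (i c : Int) (hc : c < n) :
    ffsB_loop n (List.replicate j "." ++ d) i c =
      if (c + j : Int) ≥ n then i - c else ffsB_loop n d (i + j) (c + j) := by
  induction j generalizing i c with
  | zero =>
    simp only [List.replicate, List.nil_append, Nat.cast_zero, Int.add_zero]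
    rw [if_neg (by omega)]
  | succ j ih =>
    rw [List.replicate_succ, List.cons_append]
    simp only [ffsB_loop, beq_self_eq_true, if_pos]
    by_cases h1 : c + 1 ≥ n
    · rw [if_pos (by simpa using h1), if_pos (by push_cast; omega)]
      omega
    · rw [if_neg (by simpa using h1), ih (i + 1) (c + 1) (by omega)]
      by_cases h2 : (c + 1 + j : Int) ≥ n
      · rw [if_pos h2, if_pos (by push_cast; omega)]
        omega
      · rw [if_neg h2, if_neg (by push_cast; omega)]
        push_cast
        ring_nf

-- B scanning a block of non-dots just advances the index (count stays 0)
theorem ffsB_nondots (n : Int) (run : List String) (hrun : ∀ y ∈ run, y ≠ ".")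
    (d : List String) (i : Int) :
    ffsB_loop n (run ++ d) i 0 = ffsB_loop n d (i + run.length) 0 := by
  induction run generalizing i with
  | nil => simp
  | cons a as ih =>
    have ha : (a == ".") = false := by
      simpa using hrun a (List.mem_cons_self)
    rw [List.cons_append]
    simp only [ffsB_loop, ha, Bool.false_eq_true, List.length_cons]
    rw [ih (fun y hy => hrun y (List.mem_cons_of_mem _ hy)) (i + 1)]
    push_cast
    ring_nf

-- main equivalence: B's counter scan equals A's groupby loop, run by run
theorem ffs_main (n : Int) (l : List String) (i : Int) :
    ffsB_loop n l i 0 = ffsA_loop n l i := by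
  match l with
  | [] => rw [ffsA_loop]; rfl
  | x :: xs =>
    rw [ffsA_loop]
    set t := xs.takeWhile (fun y => y == x) with ht
    set d := xs.dropWhile (fun y => y == x) with hd
    have hxs : xs = t ++ d := (List.takeWhile_append_dropWhile (p := fun y => y == x) (l := xs)).symm
    have hdlen : d.length ≤ xs.length := List.length_dropWhile_le _ _
    have hdlt : d.length < (x :: xs).length := by simp only [List.length_cons]; omega
    by_cases hx : x = "."
    · subst hx
      have hrep : ("." :: xs : List String) = List.replicate (1 + t.length) "." ++ d := by
        rw [hxs, ← List.cons_append]
        congr 1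
        rw [Nat.add_comm, List.replicate_succ]
        congr 1
        have := takeWhile_beq_eq_replicate "." xs
        rw [← ht] at this
        exact this
      by_cases hn : (1 + t.length : Int) ≥ n
      · -- A returns index; B triggers inside the dot run
        rw [if_pos (by simp; omega)]
        rcases Int.lt_or_le 0 n with hpos | hnp
        · rw [hrep, ffsB_dots n (1 + t.length) d i 0 (by omega)]
          rw [if_pos (by push_cast; omega)]
          omega
        · -- n ≤ 0: B triggers on the very first dot
          simp only [ffsB_loop, beq_self_eq_true, if_pos]
          rw [if_pos (by simp; omega)]
          omega
      · rw [if_neg (by simp; omega)]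
        have hpos : 0 < n := by omega
        rw [hrep, ffsB_dots n (1 + t.length) d i 0 (by omega)]
        rw [if_neg (by push_cast at hn ⊢; omega)]
        -- after the short dot run, d starts with a non-dot (or is empty): count resets
        rcases hdd : d with _ | ⟨y, ys⟩
        · rw [ffsA_loop]; rfl
        · have hy : (y == ".") = false := by
            have h2 := List.head?_dropWhile_not (fun z => z == ".") xs
            rw [← hd, hdd] at h2
            simpa using h2
          have hstep : ∀ (c : Int), ffsB_loop n (y :: ys) (i + (1 + t.length : Nat)) c
              = ffsB_loop n ys (i + (1 + t.length : Nat) + 1) 0 := by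
            intro c
            simp [ffsB_loop, hy]
          rw [hstep, ← hstep 0]
          rw [ffs_main n (y :: ys)]
          push_cast
          ring_nf
    · -- whole leading run is non-dots
      have hall : ∀ y ∈ x :: t, y ≠ "." := by
        intro y hy
        rcases List.mem_cons.mp hy with h | h
        · simpa [h] using hx
        · have h2 := List.mem_takeWhile_imp (ht ▸ h)
          simp at h2
          simpa [h2] using hx
      rw [if_neg (by simp [hx])]
      have hsplit : (x :: xs : List String) = (x :: t) ++ d := by
        rw [hxs]; rfl
      rw [hsplit, ffsB_nondots n (x :: t) hall d i]
      rw [ffs_main n d]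
      simp only [List.length_cons]
      push_cast
      ring_nf
termination_by l.length
decreasing_by all_goals (first
  | (simp only [hdd, List.length_cons] at hdlt ⊢; omega)
  | (simp only [List.length_cons] at hdlt ⊢; omega))

-- ===== VERDICT (by name: the statement is the Claim_ definition above) =====
theorem find_free_space_spec : Claim_equal_find_free_space := by
  intro physical_map num_blocks _
  unfold Spec_find_free_space find_free_space find_free_space_alt
  exact (ffs_main num_blocks physical_map 0).symm
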